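-- pv_equiv track=rewrite | github.com/Prescrypto/ErsteOps | ersteops/printpdf/views.py | escape_params
-- ===== SOURCE A (Python) =====
-- def escape_params(params):
--   escaped_params = {}
--   for k,v in params.items():
--     #print k, 'Corresponds to ', v
--     #if isinstance(v,(str, unicode)):
--     if isinstance(v,str):
--       escaped_params[k] = escape_text(v)
--     else:
--       escaped_params[k] = v
--   #print escaped_params
--   return escaped_params
--
-- def escape_text(s):
--     # Convert from python escape text to latex format.
--     s = s.replace("\'","\\textquotesingle ")
--     s = s.replace("<","\\textless ")
--     s = s.replace(">","\\textgreater ")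
--     s = s.replace(u"&","\\& ")
--     s = s.replace("\"","``")
--     s = s.replace("%","\\% ")
--     s = s.replace("#","\\# ")
--     s = s.replace("\n", " \\"+ "\\")
--     s = s.replace("\r", " \\"+ "\\")
--     s = s.replace("_", "\\textunderscore ")
--     s = s.replace("{", "\\{ ")
--     s = s.replace("}", "\\} ")
--
--     s = s.strip()
--     # If no length, return something useful
--     if len(s)==0:
--         s="NA"
--     return s
-- ===== SOURCE B (Python) =====
-- SPECIALS = {
--     "'": "\\textquotesingle ",
--     "<": "\\textless ",
--     ">": "\\textgreater ",
--     "&": "\\& ",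
--     '"': "``",
--     "%": "\\% ",
--     "#": "\\# ",
--     "\n": " \\\\",
--     "\r": " \\\\",
--     "_": "\\textunderscore ",
--     "{": "\\{ ",
--     "}": "\\} ",
-- }
--
--
-- def _escape(s):
--     # Chunked scan: copy each maximal run of ordinary characters in one slice,
--     # emit the replacement for the special character that ends it, repeat.
--     pieces = []
--     i, n = 0, len(s)
--     while i < n:
--         j = i
--         while j < n and s[j] not in SPECIALS:
--             j += 1
--         pieces.append(s[i:j])
--         if j < n:
--             pieces.append(SPECIALS[s[j]])
--             j += 1
--         i = j
--     t = "".join(pieces).strip()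
--     return t if t else "NA"
--
--
-- def escape_params(params):
--     return {k: _escape(v) if isinstance(v, str) else v for k, v in params.items()}
-- ===== Notes on version B (the rewrite author's own statement) =====
-- stated objective: alternative
-- what changed: escape_text's eleven sequential whole-string replace passes are replaced by a single chunked two-pointer scan that copies each maximal run of ordinary characters as one slice and emits the dict replacement for the special character ending it, joining the pieces once; the dict-building loop becomes a dict comprehension. Safe because no replacement string contains a character replaced later in A's chain.
import Mathlib
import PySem

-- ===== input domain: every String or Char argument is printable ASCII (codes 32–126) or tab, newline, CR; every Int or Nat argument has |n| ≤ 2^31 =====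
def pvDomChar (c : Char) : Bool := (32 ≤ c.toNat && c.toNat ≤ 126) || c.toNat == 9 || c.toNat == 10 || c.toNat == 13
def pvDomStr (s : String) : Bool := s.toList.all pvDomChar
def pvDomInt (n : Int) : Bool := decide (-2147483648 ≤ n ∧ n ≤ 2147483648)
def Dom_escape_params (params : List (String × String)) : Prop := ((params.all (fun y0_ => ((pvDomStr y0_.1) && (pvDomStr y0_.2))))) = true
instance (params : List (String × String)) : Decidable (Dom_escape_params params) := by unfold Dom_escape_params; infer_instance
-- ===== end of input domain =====

-- B replaces escape_text's eleven sequential whole-string replace passes by ONE chunked scan: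
-- copy each maximal run of ordinary characters, emit the table entry for the special character
-- ending the run, join, then strip and apply the empty -> "NA" guard; same values, no speed claim.

-- ===== PORT A =====
-- escape_text: eleven chained replaces, then strip, then the len==0 -> "NA" guard.
def escape_text (s : String) : String :=
  let s := PySem.Str.replace s "'" "\\textquotesingle "
  let s := PySem.Str.replace s "<" "\\textless "
  let s := PySem.Str.replace s ">" "\\textgreater "
  let s := PySem.Str.replace s "&" "\\& "
  let s := PySem.Str.replace s "\"" "``"
  let s := PySem.Str.replace s "%" "\\% "
  let s := PySem.Str.replace s "#" "\\# "
  let s := PySem.Str.replace s "\n" " \\\\"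
  let s := PySem.Str.replace s "\r" " \\\\"
  let s := PySem.Str.replace s "_" "\\textunderscore "
  let s := PySem.Str.replace s "{" "\\{ "
  let s := PySem.Str.replace s "}" "\\} "
  let s := PySem.Str.strip s
  if PySem.Str.len s = 0 then "NA" else s

-- all values are str here (List (String × String)), so the isinstance branch always escapes
def escape_params (params : List (String × String)) : List (String × String) :=
  (params.foldl (fun d kv => d.insert kv.1 (escape_text kv.2))
    (PySem.Dict.empty : PySem.Dict String String)).items

-- ===== PORT B =====
-- the SPECIALS dict of Source B
def pvSpecials : PySem.Dict Char String := PySem.Dict.ofList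
  [('\'', "\\textquotesingle "), ('<', "\\textless "), ('>', "\\textgreater "),
   ('&', "\\& "), ('"', "``"), ('%', "\\% "), ('#', "\\# "),
   ('\n', " \\\\"), ('\r', " \\\\"), ('_', "\\textunderscore "),
   ('{', "\\{ "), ('}', "\\} ")]

-- the outer while loop of _escape: the inner 'while s[j] not in SPECIALS' advance is the
-- takeWhile/dropWhile split of the remaining suffix; each iteration appends the ordinary
-- chunk and, if a special character stopped the scan, its replacement; ported by hand, exact.
def escChunks (s : List Char) : List (List Char) :=
  match hs : s.dropWhile (fun c => (pvSpecials.get? c).isNone) with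
  | [] => [s.takeWhile (fun c => (pvSpecials.get? c).isNone)]
  | c :: r => s.takeWhile (fun c => (pvSpecials.get? c).isNone)
      :: ((pvSpecials.get? c).getD "").toList :: escChunks r
termination_by s.length
decreasing_by
  have h := List.length_dropWhile_le (fun c => (pvSpecials.get? c).isNone) s
  rw [hs] at h; simp at h; omega

-- "".join(pieces).strip() or "NA"
def escape_text_alt (s : String) : String :=
  let t := PySem.Str.strip (String.ofList (escChunks s.toList).flatten)
  if PySem.Str.len t = 0 then "NA" else t

-- dict comprehension over params.items()
def escape_params_alt (params : List (String × String)) : List (String × String) :=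
  (params.foldl (fun d kv => d.insert kv.1 (escape_text_alt kv.2))
    (PySem.Dict.empty : PySem.Dict String String)).items

-- ===== PRECONDITION & SPEC =====
def Spec_escape_params (params : List (String × String)) (out : List (String × String)) : Prop := out = escape_params_alt params
instance (params : List (String × String)) (out : List (String × String)) : Decidable (Spec_escape_params params out) := by unfold Spec_escape_params; infer_instance

-- ===== CLAIM =====
def Claim_equal_escape_params : Prop := ∀ (params : List (String × String)), Dom_escape_params params → Spec_escape_params params (escape_params params)

-- ===== LEMMAS AND PROOFS =====

-- per-character translation both programs compute (proof-side characterisation)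
def pvTr (c : Char) : List Char :=
  if c = '\'' then "\\textquotesingle ".toList else
  if c = '<' then "\\textless ".toList else
  if c = '>' then "\\textgreater ".toList else
  if c = '&' then "\\& ".toList else
  if c = '"' then "``".toList else
  if c = '%' then "\\% ".toList else
  if c = '#' then "\\# ".toList else
  if c = '\n' then " \\\\".toList else
  if c = '\r' then " \\\\".toList else
  if c = '_' then "\\textunderscore ".toList else
  if c = '{' then "\\{ ".toList else
  if c = '}' then "\\} ".toList else [c]

-- B's table lookup as a function
def pvTrB (c : Char) : List Char :=
  match pvSpecials.get? c with
  | some r => r.toList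
  | none => [c]

-- the eleven chained replaces on the character-list side (A-side characterisation)
def pvChainA (l : List Char) : List Char :=
  let l := PySem.Chars.replace l ['\''] "\\textquotesingle ".toList
  let l := PySem.Chars.replace l ['<'] "\\textless ".toList
  let l := PySem.Chars.replace l ['>'] "\\textgreater ".toList
  let l := PySem.Chars.replace l ['&'] "\\& ".toList
  let l := PySem.Chars.replace l ['"'] "``".toList
  let l := PySem.Chars.replace l ['%'] "\\% ".toList
  let l := PySem.Chars.replace l ['#'] "\\# ".toList
  let l := PySem.Chars.replace l ['\n'] " \\\\".toList
  let l := PySem.Chars.replace l ['\r'] " \\\\".toList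
  let l := PySem.Chars.replace l ['_'] "\\textunderscore ".toList
  let l := PySem.Chars.replace l ['{'] "\\{ ".toList
  PySem.Chars.replace l ['}'] "\\} ".toList

lemma go_single (c : Char) (r : List Char) : ∀ (fuel : Nat) (l acc : List Char), l.length ≤ fuel →
    PySem.Chars.replace.go [c] r fuel l acc = acc.reverse ++ l.flatMap (fun x => if x = c then r else [x])
  | 0, l, acc, h => by
    rw [PySem.Chars.replace.go]
    cases l with
    | nil => simp
    | cons a t => simp at h
  | fuel+1, [], acc, h => by rw [PySem.Chars.replace.go]; simp; omega
  | fuel+1, a :: t, acc, h => by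
    rw [PySem.Chars.replace.go]
    simp only [List.length_cons] at h
    by_cases hac : a = c
    · rw [if_pos (by simp [List.isPrefixOf, hac] : [c].isPrefixOf (a :: t) = true)]
      rw [go_single c r fuel _ _ (by simpa using Nat.le_of_succ_le_succ h)]
      simp [hac]
    · rw [if_neg (by simp [List.isPrefixOf]; exact fun h2 => hac h2.symm : ¬ ([c].isPrefixOf (a :: t) = true))]
      rw [go_single c r fuel t (a :: acc) (by omega)]
      simp [hac]

lemma replace_single (l : List Char) (c : Char) (r : List Char) :
    PySem.Chars.replace l [c] r = l.flatMap (fun x => if x = c then r else [x]) := by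
  rw [PySem.Chars.replace]
  simp [go_single c r l.length l [] le_rfl]

lemma chainA_append (x y : List Char) : pvChainA (x ++ y) = pvChainA x ++ pvChainA y := by
  simp [pvChainA, replace_single, List.flatMap_append]

-- per character the chained replaces compute exactly the translation table
-- (no replacement string contains a key replaced later in the chain)
lemma chainA_single (a : Char) : pvChainA [a] = pvTr a := by
  by_cases h1 : a = '\'';  · subst h1; decide
  by_cases h2 : a = '<';   · subst h2; decide
  by_cases h3 : a = '>';   · subst h3; decide
  by_cases h4 : a = '&';   · subst h4; decide
  by_cases h5 : a = '"';   · subst h5; decide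
  by_cases h6 : a = '%';   · subst h6; decide
  by_cases h7 : a = '#';   · subst h7; decide
  by_cases h8 : a = '\n';  · subst h8; decide
  by_cases h9 : a = '\r';  · subst h9; decide
  by_cases h10 : a = '_';  · subst h10; decide
  by_cases h11 : a = '{';  · subst h11; decide
  by_cases h12 : a = '}';  · subst h12; decide
  simp [pvChainA, replace_single, pvTr, h1, h2, h3, h4, h5, h6, h7, h8, h9, h10, h11, h12]

lemma chainA_eq (l : List Char) : pvChainA l = l.flatMap pvTr := by
  induction l with
  | nil => decide
  | cons a t ih =>
    have : (a :: t) = [a] ++ t := rfl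
    rw [this, chainA_append, chainA_single, ih, List.flatMap_append]
    simp

-- the B-side table agrees with the characterisation
lemma trB_eq_tr (a : Char) : pvTrB a = pvTr a := by
  by_cases h1 : a = '\'';  · subst h1; decide
  by_cases h2 : a = '<';   · subst h2; decide
  by_cases h3 : a = '>';   · subst h3; decide
  by_cases h4 : a = '&';   · subst h4; decide
  by_cases h5 : a = '"';   · subst h5; decide
  by_cases h6 : a = '%';   · subst h6; decide
  by_cases h7 : a = '#';   · subst h7; decide
  by_cases h8 : a = '\n';  · subst h8; decide
  by_cases h9 : a = '\r';  · subst h9; decide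
  by_cases h10 : a = '_';  · subst h10; decide
  by_cases h11 : a = '{';  · subst h11; decide
  by_cases h12 : a = '}';  · subst h12; decide
  have hnone : pvSpecials.get? a = none := by
    have hit : pvSpecials = PySem.Dict.mk
      [('\'', "\\textquotesingle "), ('<', "\\textless "), ('>', "\\textgreater "),
       ('&', "\\& "), ('"', "``"), ('%', "\\% "), ('#', "\\# "),
       ('\n', " \\\\"), ('\r', " \\\\"), ('_', "\\textunderscore "),
       ('{', "\\{ "), ('}', "\\} ")] := by decide
    rw [hit]
    simp [beq_iff_eq, Ne.symm h1, Ne.symm h2, Ne.symm h3, Ne.symm h4, Ne.symm h5, Ne.symm h6,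
      Ne.symm h7, Ne.symm h8, Ne.symm h9, Ne.symm h10, Ne.symm h11, Ne.symm h12, PySem.Dict.get?]
  simp [pvTrB, pvTr, hnone, h1, h2, h3, h4, h5, h6, h7, h8, h9, h10, h11, h12]

-- ordinary chunks translate to themselves
lemma flatMap_takeWhile (l : List Char) :
    (l.takeWhile (fun c => (pvSpecials.get? c).isNone)).flatMap pvTrB
      = l.takeWhile (fun c => (pvSpecials.get? c).isNone) := by
  induction l with
  | nil => rfl
  | cons a t ih =>
    by_cases h : (pvSpecials.get? a).isNone
    · simp [ih, pvTrB, Option.isNone_iff_eq_none.mp h]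
    · simp [h]

-- B's chunked scan flattens to the per-character translation
lemma escChunks_flatten : ∀ (n : Nat) (l : List Char), l.length ≤ n →
    (escChunks l).flatten = l.flatMap pvTrB
  | 0, l, h => by
    have : l = [] := by cases l with | nil => rfl | cons a t => simp at h
    subst this
    unfold escChunks
    simp
  | n+1, l, h => by
    unfold escChunks
    split
    · rename_i hs
      have hl : l = l.takeWhile (fun c => (pvSpecials.get? c).isNone) := by
        conv_lhs => rw [← List.takeWhile_append_dropWhile
          (p := fun c => (pvSpecials.get? c).isNone) (l := l)]
        rw [hs]; simp
      rw [List.flatten, List.flatten]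
      conv_rhs => rw [hl]
      rw [flatMap_takeWhile]; simp
    · rename_i c r hs
      have hlen : r.length ≤ n := by
        have h2 := List.length_dropWhile_le (fun c => (pvSpecials.get? c).isNone) l
        rw [hs] at h2; simp at h2; omega
      have hc : (pvSpecials.get? c).isNone = false := by
        have hne : l.dropWhile (fun c => (pvSpecials.get? c).isNone) ≠ [] := by rw [hs]; simp
        have hc0 := List.head_dropWhile_not (fun c => (pvSpecials.get? c).isNone) hne
        simp only [hs, List.head_cons] at hc0
        exact hc0
      have hcsome : ∃ v, pvSpecials.get? c = some v := by
        cases hg : pvSpecials.get? c with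
        | none => simp [hg] at hc
        | some v => exact ⟨v, rfl⟩
      obtain ⟨v, hv⟩ := hcsome
      have hl : l = l.takeWhile (fun c => (pvSpecials.get? c).isNone) ++ c :: r := by
        conv_lhs => rw [← List.takeWhile_append_dropWhile
          (p := fun c => (pvSpecials.get? c).isNone) (l := l)]
        rw [hs]
      rw [List.flatten, List.flatten]
      conv_rhs => rw [hl]
      rw [List.flatMap_append, flatMap_takeWhile]
      simp [escChunks_flatten n r hlen, pvTrB, hv]

lemma escape_text_eq (s : String) : escape_text s = escape_text_alt s := by
  have ht : PySem.Str.replace (PySem.Str.replace (PySem.Str.replace (PySem.Str.replace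
      (PySem.Str.replace (PySem.Str.replace (PySem.Str.replace (PySem.Str.replace
      (PySem.Str.replace (PySem.Str.replace (PySem.Str.replace (PySem.Str.replace
      s "'" "\\textquotesingle ") "<" "\\textless ") ">" "\\textgreater ") "&" "\\& ")
      "\"" "``") "%" "\\% ") "#" "\\# ") "\n" " \\\\") "\r" " \\\\")
      "_" "\\textunderscore ") "{" "\\{ ") "}" "\\} "
      = String.ofList ((escChunks s.toList).flatten) := by
    apply String.toList_inj.mp
    simp only [PySem.Str.toList_replace, String.toList_ofList]
    rw [escChunks_flatten s.toList.length s.toList le_rfl]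
    have : s.toList.flatMap pvTrB = s.toList.flatMap pvTr := by
      induction s.toList with
      | nil => rfl
      | cons a t ih => simp [List.flatMap_cons, ih, trB_eq_tr]
    rw [this]
    simpa [pvChainA] using chainA_eq s.toList
  simp only [escape_text, escape_text_alt, ht]

-- ===== VERDICT =====
theorem escape_params_spec : Claim_equal_escape_params := by
  intro params _
  unfold Spec_escape_params escape_params escape_params_alt
  have hf : (fun (d : PySem.Dict String String) (kv : String × String) => d.insert kv.1 (escape_text kv.2))
      = (fun d kv => d.insert kv.1 (escape_text_alt kv.2)) := by
    funext d kv; rw [escape_text_eq]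
  rw [hf]
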